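-- pv_equiv track=rewrite | github.com/alinkasergei/phyton1 | ДЗ/3.py | funk_febonachi
-- ===== SOURCE A (Python) =====
-- def funk_febonachi(n):
--     ans_arr = [0]
--     j = 1
--     for i in range(1,n+1):
--         if i%2 == 0:
--             ans_arr.insert(0,-j)
--         else:
--             ans_arr.insert(0,j)
--         ans_arr.append(j)
--         j += ans_arr[-2]
--     return ans_arr
-- ===== SOURCE B (Python) =====
-- def funk_febonachi(n):
--     fibs = []
--     a, b = 1, 0
--     for _ in range(1, n + 1):
--         fibs.append(a)
--         a, b = a + b, a
--     left = [(-1) ** (k + 1) * fibs[k - 1] for k in range(n, 0, -1)]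
--     return left + [0] + fibs
-- ===== Notes on version B (the rewrite author's own statement) =====
-- stated objective: alternative
-- what changed: B first builds the Fibonacci table with explicit (a,b) variables, then assembles the signed left half as a separate reversed-range comprehension and concatenates left + [0] + fibs, instead of A's single loop that prepends/appends into one array and reads the array's [-2] element for the recurrence.
import Mathlib
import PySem

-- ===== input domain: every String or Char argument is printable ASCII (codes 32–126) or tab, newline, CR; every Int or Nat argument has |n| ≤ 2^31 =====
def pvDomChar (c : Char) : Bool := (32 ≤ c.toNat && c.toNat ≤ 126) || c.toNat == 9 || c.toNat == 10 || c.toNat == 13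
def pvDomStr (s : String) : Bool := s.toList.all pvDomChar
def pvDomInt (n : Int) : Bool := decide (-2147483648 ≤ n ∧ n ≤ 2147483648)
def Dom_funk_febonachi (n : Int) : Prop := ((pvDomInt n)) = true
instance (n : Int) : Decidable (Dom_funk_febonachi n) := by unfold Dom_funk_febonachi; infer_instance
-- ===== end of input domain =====

-- B replaces A's interleaved prepend/append loop (which reads its own array for the
-- recurrence) by a plain Fibonacci table plus a separate signed comprehension for the
-- left half; objective: alternative decomposition, same cost.

-- ===== PORT A =====
-- state = (ans_arr, j); ans_arr[-2] via pyGet? (always in range here, so getD 0 is exact)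
def funk_febonachi (n : Int) : List Int :=
  (((PySem.List.pyRange 1 (n+1) 1).foldl
    (fun (st : List Int × Int) i =>
      let arr1 := if PySem.Int.mod i 2 = 0 then (-st.2) :: st.1 else st.2 :: st.1
      let arr2 := arr1 ++ [st.2]
      (arr2, st.2 + (PySem.List.pyGet? arr2 (-2)).getD 0))
    ([0], 1))).1

-- ===== PORT B =====
-- fibs table: state = (fibs, a, b); left half: (-1)**(k+1) ported as (-1)^(k+1).toNat
-- (exact: k ≥ 1 in the range, so the exponent is a nonnegative int)
def funk_febonachi_alt (n : Int) : List Int :=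
  let st := (PySem.List.pyRange 1 (n+1) 1).foldl
    (fun (st : List Int × Int × Int) _ => (st.1 ++ [st.2.1], st.2.1 + st.2.2, st.2.1))
    ([], 1, 0)
  let fibs := st.1
  let left := (PySem.List.pyRange n 0 (-1)).map
    (fun k => (-1 : Int) ^ (k+1).toNat * (PySem.List.pyGet? fibs (k-1)).getD 0)
  left ++ [0] ++ fibs

-- ===== PRECONDITION & SPEC =====
def Spec_funk_febonachi (n : Int) (out : List Int) : Prop := out = funk_febonachi_alt n
instance (n : Int) (out : List Int) : Decidable (Spec_funk_febonachi n out) := by unfold Spec_funk_febonachi; infer_instance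

-- ===== CLAIM (what is proved, stated in full; the proofs are below) =====
def Claim_equal_funk_febonachi : Prop := ∀ (n : Int), Dom_funk_febonachi n → Spec_funk_febonachi n (funk_febonachi n)

-- ===== LEMMAS AND PROOFS =====

def fibI : Nat → Int
  | 0 => 0
  | 1 => 1
  | (m+2) => fibI (m+1) + fibI m

def fibListI (m : Nat) : List Int := (List.range m).map (fun k => fibI (k+1))

def sgnI (i : Nat) : Int := if i % 2 = 0 then -1 else 1

def leftListI : Nat → List Int
  | 0 => []
  | (m+1) => (sgnI (m+1) * fibI (m+1)) :: leftListI m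

theorem fibListI_succ (m : Nat) : fibListI (m+1) = fibListI m ++ [fibI (m+1)] := by
  simp [fibListI, List.range_succ]

theorem zero_fibListI (m : Nat) : ∃ ws, (0 : Int) :: fibListI m = ws ++ [fibI m] := by
  cases m with
  | zero => exact ⟨[], rfl⟩
  | succ m => exact ⟨0 :: fibListI m, by rw [fibListI_succ]; simp⟩

theorem pyGet?_neg_two (xs : List Int) (a b : Int) :
    PySem.List.pyGet? (xs ++ [a, b]) (-2) = some a := by
  have h2 : (2 : Nat) ≤ (xs ++ [a, b]).length := by simp
  rw [PySem.List.pyGet?_neg_ofNat (xs ++ [a, b]) 2 (by norm_num) h2]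
  simp

def stepA (st : List Int × Int) (i : Int) : List Int × Int :=
  let arr1 := if PySem.Int.mod i 2 = 0 then (-st.2) :: st.1 else st.2 :: st.1
  let arr2 := arr1 ++ [st.2]
  (arr2, st.2 + (PySem.List.pyGet? arr2 (-2)).getD 0)

theorem sgn_branch (m : Nat) (j : Int) :
    (if PySem.Int.mod ((m:Int)+1) 2 = 0 then -j else j) = sgnI (m+1) * j := by
  have : PySem.Int.mod ((m:Int)+1) 2 = (((m+1) % 2 : Nat) : Int) := by
    rw [PySem.Int.mod_eq_emod_of_pos (by norm_num)]
    omega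
  rw [this]
  unfold sgnI
  by_cases h : (m+1) % 2 = 0 <;> simp [h]
  omega

theorem foldA_inv (m : Nat) :
    (PySem.List.pyRange 1 ((m:Int)+1) 1).foldl stepA ([0], 1)
      = (leftListI m ++ 0 :: fibListI m, fibI (m+1)) := by
  induction m with
  | zero => simp [PySem.List.pyRange_one_eq_nil, leftListI, fibListI, fibI]
  | succ m ih =>
    have hr : PySem.List.pyRange 1 ((↑(m+1):Int)+1) 1
        = PySem.List.pyRange 1 ((m:Int)+1) 1 ++ [(m:Int)+1] := by
      have := PySem.List.pyRange_one_succ_right (a := 1) (b := (m:Int)+1) (by omega)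
      push_cast
      push_cast at this
      convert this using 2
    rw [hr, List.foldl_append, ih]
    simp only [List.foldl]
    unfold stepA
    obtain ⟨ws, hws⟩ := zero_fibListI m
    simp only
    rw [← apply_ite (fun x => x :: (leftListI m ++ 0 :: fibListI m))
          (PySem.Int.mod ((m:Int)+1) 2 = 0) (-fibI (m+1)) (fibI (m+1)),
        sgn_branch m (fibI (m+1))]
    rw [Prod.mk.injEq]
    constructor
    · rw [leftListI, fibListI_succ]
      simp
    · have harr : (sgnI (m+1) * fibI (m+1)) :: (leftListI m ++ 0 :: fibListI m) ++ [fibI (m+1)]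
          = ((sgnI (m+1) * fibI (m+1)) :: leftListI m ++ ws) ++ [fibI m, fibI (m+1)] := by
        rw [hws] at *
        simp
      rw [harr, pyGet?_neg_two]
      simp [fibI]

def stepB (st : List Int × Int × Int) (_i : Int) : List Int × Int × Int :=
  (st.1 ++ [st.2.1], st.2.1 + st.2.2, st.2.1)

theorem foldB_inv (m : Nat) :
    (PySem.List.pyRange 1 ((m:Int)+1) 1).foldl stepB ([], 1, 0)
      = (fibListI m, fibI (m+1), fibI m) := by
  induction m with
  | zero => simp [PySem.List.pyRange_one_eq_nil, fibListI, fibI]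
  | succ m ih =>
    have hr : PySem.List.pyRange 1 ((↑(m+1):Int)+1) 1
        = PySem.List.pyRange 1 ((m:Int)+1) 1 ++ [(m:Int)+1] := by
      have := PySem.List.pyRange_one_succ_right (a := 1) (b := (m:Int)+1) (by omega)
      push_cast
      push_cast at this
      convert this using 2
    rw [hr, List.foldl_append, ih]
    simp [stepB, fibListI_succ, fibI]

theorem fibListI_get (n k : Nat) (h : k < n) :
    (PySem.List.pyGet? (fibListI n) (((k:Int)+1) - 1)).getD 0 = fibI (k+1) := by
  have : ((k:Int)+1) - 1 = ((k:Nat) : Int) := by ring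
  rw [this, PySem.List.pyGet?_natCast]
  simp [fibListI, h]

theorem pow_sgn (k : Nat) : ((-1 : Int)) ^ (((k:Int)+1)+1).toNat = sgnI (k+1) := by
  have h : (((k:Int)+1)+1).toNat = k + 2 := by omega
  rw [h]
  unfold sgnI
  by_cases hp : (k+1) % 2 = 0
  · have he : Odd (k+2) := ⟨(k+1)/2, by omega⟩
    simp [he.neg_one_pow, hp]
  · have he : Even (k+2) := ⟨(k+2)/2, by omega⟩
    simp [he.neg_one_pow, hp]

theorem mapB_inv (n : Nat) : ∀ (m : Nat), m ≤ n →
    (PySem.List.pyRange (m:Int) 0 (-1)).map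
      (fun k => (-1 : Int) ^ (k+1).toNat * (PySem.List.pyGet? (fibListI n) (k-1)).getD 0)
      = leftListI m := by
  intro m
  induction m with
  | zero => intro _; simp [PySem.List.pyRange_neg_one_eq_nil, leftListI]
  | succ m ih =>
    intro hle
    have hr : PySem.List.pyRange (↑(m+1):Int) 0 (-1)
        = ((m:Int)+1) :: PySem.List.pyRange ((m:Int)) 0 (-1) := by
      have := PySem.List.pyRange_neg_one_cons (a := ((m:Int)+1)) (b := 0) (by omega)
      push_cast
      convert this using 3
      omega
    rw [hr, List.map_cons, ih (by omega)]
    rw [leftListI]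
    congr 1
    rw [fibListI_get n m (by omega), pow_sgn m]

-- ===== VERDICT (by name: the statement is the Claim_ definition above) =====
theorem funk_febonachi_spec : Claim_equal_funk_febonachi := by
  intro n _
  unfold Spec_funk_febonachi funk_febonachi funk_febonachi_alt
  by_cases hn : n ≤ 0
  · rw [PySem.List.pyRange_one_eq_nil (by omega), PySem.List.pyRange_neg_one_eq_nil (by omega)]
    simp
  · obtain ⟨m, rfl⟩ : ∃ m : Nat, n = (m : Int) := ⟨n.toNat, by omega⟩
    have hA := foldA_inv m
    have hB := foldB_inv m
    unfold stepA at hA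
    unfold stepB at hB
    rw [hA, hB]
    simp only
    rw [mapB_inv m m (le_refl m)]
    simp
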